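-- pv_equiv track=rewrite | github.com/jpdotcom/Hackerrank-solutions | TheStoryofATree(Medium)Solution.py | getinitState
-- ===== SOURCE A (Python) =====
-- def getinitState(adj,correct,u,guesses,parent):
--
--     for v in adj[u]:
--
--         if parent[u]!=v:
--             parent[v]=u
--             if (u,v) in guesses:
--
--                 correct=getinitState(adj,correct+1,v,guesses,parent)
--
--             else:
--                 correct=getinitState(adj,correct,v,guesses,parent)
--
--     return correct
-- ===== SOURCE B (Python) =====
-- def getinitState(adj, correct, u, guesses, parent):
--     # Iterative DFS: the recursion is replaced by an explicit stack of
--     # (node, remaining-children) frames; 'correct' and 'parent' are updated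
--     # in place exactly as the recursive traversal would.
--     stack = [(u, list(adj[u]))]
--     while stack:
--         node, children = stack.pop()
--         if not children:
--             continue
--         v = children[0]
--         stack.append((node, children[1:]))
--         if parent[node] != v:
--             parent[v] = node
--             if (node, v) in guesses:
--                 correct += 1
--             stack.append((v, list(adj[v])))
--     return correct
-- ===== Notes on version B (the rewrite author's own statement) =====
-- stated objective: alternative
-- what changed: The recursive DFS is replaced by an iterative one: a single while-loop over an explicit stack of (node, remaining-children) frames that performs the same traversal, parent updates and guess counting without any function recursion.
import Mathlib
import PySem

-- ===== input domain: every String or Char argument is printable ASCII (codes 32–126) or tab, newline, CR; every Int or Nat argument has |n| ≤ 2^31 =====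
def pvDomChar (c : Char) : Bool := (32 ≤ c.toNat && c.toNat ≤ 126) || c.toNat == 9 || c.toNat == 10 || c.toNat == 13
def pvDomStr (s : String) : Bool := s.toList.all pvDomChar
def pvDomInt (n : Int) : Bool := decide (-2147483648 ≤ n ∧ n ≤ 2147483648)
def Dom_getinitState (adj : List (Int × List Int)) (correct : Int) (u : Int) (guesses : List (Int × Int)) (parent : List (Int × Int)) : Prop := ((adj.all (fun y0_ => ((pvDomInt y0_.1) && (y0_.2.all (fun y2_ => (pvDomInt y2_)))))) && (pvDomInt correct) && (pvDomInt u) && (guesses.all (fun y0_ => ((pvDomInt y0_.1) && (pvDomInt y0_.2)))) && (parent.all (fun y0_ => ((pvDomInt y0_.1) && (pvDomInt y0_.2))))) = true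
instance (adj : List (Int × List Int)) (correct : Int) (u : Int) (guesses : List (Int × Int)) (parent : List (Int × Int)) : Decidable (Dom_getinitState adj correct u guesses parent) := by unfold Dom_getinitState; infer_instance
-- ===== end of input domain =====

-- B replaces A's recursion by an iterative DFS over an explicit stack of (node, remaining-children)
-- frames (same traversal order and the same in-place parent/correct updates); return values proved equal.

-- ===== PORT A =====
-- fuel bound (a Lean totality artifact only: the Python recursion's depth on any input Pre_ admits
-- is at most the number of distinct (came-from, node) states, which this over-counts)
def pvSize (adj : List (Int × List Int)) : Nat :=
  2 * adj.foldl (fun a p => a + p.2.length) 0 + adj.length + 2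

mutual
-- the 'for v in adj[u]' loop body of A, remaining children vs; state = (correct, parent)
def pvLoopA (adjL : List (Int × List Int)) (guesses : List (Int × Int)) :
    Nat → Int → List Int → Int × PySem.Dict Int Int → Int × PySem.Dict Int Int
  | _, _, [], s => s
  | f, node, v :: vs, (c, par) =>
      if par.getD node 0 ≠ v then
        let par' := par.insert v node
        let c' := if (node, v) ∈ guesses then c + 1 else c
        pvLoopA adjL guesses f node vs (pvVisitA adjL guesses f v (c', par'))
      else pvLoopA adjL guesses f node vs (c, par)
  termination_by f _ vs _ => (f, vs.length + 1)

-- one recursive call 'getinitState(adj, …, v, …)' of A, at depth fuel f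
def pvVisitA (adjL : List (Int × List Int)) (guesses : List (Int × Int)) :
    Nat → Int → Int × PySem.Dict Int Int → Int × PySem.Dict Int Int
  | 0, _, s => s
  | f + 1, v, s => pvLoopA adjL guesses f v ((PySem.Dict.ofList adjL).getD v []) s
  termination_by f _ _ => (f, 0)
end

def getinitState (adj : List (Int × List Int)) (correct : Int) (u : Int) (guesses : List (Int × Int)) (parent : List (Int × Int)) : Int :=
  (pvVisitA adj guesses (pvSize adj + 1) u (correct, PySem.Dict.ofList parent)).1

-- ===== PORT B =====
-- weight of a frame stack: used only for termination of pvDfsB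
def pvK (adj : List (Int × List Int)) : Nat :=
  (adj.map (fun p => p.2.length)).foldr Nat.max 0 + 2

def pvW (K : Nat) : List (Nat × Int × List Int) → Nat
  | [] => 0
  | (f, _, vs) :: rest => (vs.length + 1) * K ^ f + pvW K rest

theorem pv_mem_le_foldr_max (x : Nat) : ∀ (l : List Nat), x ∈ l → x ≤ l.foldr Nat.max 0
  | a :: l, h => by
    rcases List.mem_cons.mp h with rfl | h'
    · exact Nat.le_max_left _ _
    · exact le_trans (pv_mem_le_foldr_max x l h') (Nat.le_max_right _ _)

theorem pv_vals_update (d : PySem.Dict Int (List Int)) (l : List (Int × List Int)) (w : List Int)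
    (h : w ∈ (d.update l).values) : w ∈ d.values ∨ w ∈ l.map (·.2) := by
  induction l generalizing d with
  | nil => left; simpa [PySem.Dict.update] using h
  | cons p rest ih =>
      have h' : w ∈ ((d.insert p.1 p.2).update rest).values := by
        simpa [PySem.Dict.update] using h
      rcases ih (d.insert p.1 p.2) h' with hv | hl
      · simp only [PySem.Dict.values] at hv
        rcases List.mem_map.mp hv with ⟨q, hq, hqw⟩
        rw [PySem.Dict.mem_items_insert] at hq
        rcases hq with rfl | ⟨hq', _⟩
        · right; simp [← hqw]
        · left
          simp only [PySem.Dict.values]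
          exact List.mem_map.mpr ⟨q, hq', hqw⟩
      · right; simp at hl ⊢; tauto

theorem pv_getD_len_le (adj : List (Int × List Int)) (v : Int) :
    ((PySem.Dict.ofList adj).getD v []).length + 1 < pvK adj := by
  have hk : 2 ≤ pvK adj := Nat.le_add_left 2 _
  cases h : (PySem.Dict.ofList adj).get? v with
  | none =>
      rw [PySem.Dict.getD_eq_get?_getD, h]
      simp [pvK]
  | some w =>
      rw [PySem.Dict.getD_eq_get?_getD, h]
      have hmem : w ∈ (PySem.Dict.ofList adj).values := by
        have hit := PySem.Dict.mem_items_of_get?_eq_some (d := PySem.Dict.ofList adj) h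
        simp only [PySem.Dict.values]
        exact List.mem_map.mpr ⟨(v, w), hit, rfl⟩
      have : w ∈ (PySem.Dict.empty : PySem.Dict Int (List Int)).values ∨ w ∈ adj.map (·.2) := by
        apply pv_vals_update
        simpa [PySem.Dict.ofList] using hmem
      have hw : w ∈ adj.map (·.2) := by
        rcases this with h0 | h1
        · simp [PySem.Dict.values, PySem.Dict.empty] at h0
        · exact h1
      have : w.length ∈ adj.map (fun p => p.2.length) := by
        rcases List.mem_map.mp hw with ⟨p, hp, rfl⟩
        exact List.mem_map.mpr ⟨p, hp, rfl⟩
      have := pv_mem_le_foldr_max _ _ this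
      simp only [pvK, Option.getD_some]
      omega

theorem pvK_pos (adjL : List (Int × List Int)) : 0 < pvK adjL := by
  unfold pvK; omega

theorem pv_dec_pop (K : Nat) (hK : 0 < K) (f : Nat) (node : Int)
    (rest : List (Nat × Int × List Int)) :
    pvW K rest < pvW K ((f, node, ([] : List Int)) :: rest) := by
  have h1 : 0 < K ^ f := Nat.pow_pos hK
  simp [pvW]; omega

theorem pv_dec_skip (K : Nat) (hK : 0 < K) (f : Nat) (node v : Int) (vs : List Int)
    (rest : List (Nat × Int × List Int)) :
    pvW K ((f, node, vs) :: rest) < pvW K ((f, node, v :: vs) :: rest) := by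
  have h1 : 0 < K ^ f := Nat.pow_pos hK
  simp only [pvW, List.length_cons]
  have h2 : (vs.length + 1) * K ^ f < (vs.length + 1 + 1) * K ^ f := by
    exact Nat.mul_lt_mul_of_pos_right (by omega) h1
  omega

theorem pv_dec_push (K : Nat) (cs : List Int) (hc : cs.length + 1 < K) (g : Nat)
    (node v : Int) (vs : List Int) (rest : List (Nat × Int × List Int)) :
    pvW K ((g, v, cs) :: (g + 1, node, vs) :: rest)
      < pvW K ((g + 1, node, v :: vs) :: rest) := by
  have hK : 0 < K := by omega
  have h1 : 0 < K ^ g := Nat.pow_pos hK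
  have h5 : (cs.length + 1) * K ^ g < K ^ (g + 1) := by
    calc (cs.length + 1) * K ^ g < K * K ^ g := Nat.mul_lt_mul_of_pos_right hc h1
    _ = K ^ (g + 1) := by rw [pow_succ]; ring
  have h2 : (vs.length + 1) * K ^ (g + 1) < (vs.length + 1 + 1) * K ^ (g + 1) := by
    have h6 : 0 < K ^ (g + 1) := Nat.pow_pos hK
    exact Nat.mul_lt_mul_of_pos_right (by omega) h6
  have h7 : (vs.length + 1 + 1) * K ^ (g + 1)
      = (vs.length + 1) * K ^ (g + 1) + K ^ (g + 1) := by ring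
  simp only [pvW, List.length_cons]
  omega

-- the while-stack loop of B: frames are (fuel, node, remaining children); fuel is a Lean
-- totality artifact (Source B's loop needs none), spent only when a child frame is pushed
def pvDfsB (adjL : List (Int × List Int)) (guesses : List (Int × Int)) :
    List (Nat × Int × List Int) → Int × PySem.Dict Int Int → Int × PySem.Dict Int Int
  | [], s => s
  | (_, _, []) :: rest, s => pvDfsB adjL guesses rest s
  | (f, node, v :: vs) :: rest, (c, par) =>
      if par.getD node 0 ≠ v then
        let par' := par.insert v node
        let c' := if (node, v) ∈ guesses then c + 1 else c
        match f with
        | 0 => pvDfsB adjL guesses ((0, node, vs) :: rest) (c', par')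
        | g + 1 =>
            pvDfsB adjL guesses
              ((g, v, (PySem.Dict.ofList adjL).getD v []) :: (g + 1, node, vs) :: rest) (c', par')
      else pvDfsB adjL guesses ((f, node, vs) :: rest) (c, par)
  termination_by stack _ => pvW (pvK adjL) stack
  decreasing_by
  · exact pv_dec_pop _ (pvK_pos adjL) _ _ _
  · exact pv_dec_skip _ (pvK_pos adjL) _ _ _ _ _
  · exact pv_dec_push _ _ (pv_getD_len_le adjL v) _ _ _ _ _
  · exact pv_dec_skip _ (pvK_pos adjL) _ _ _ _ _

-- B's own copy of the depth-fuel bound (a totality artifact; Source B's loop needs none)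
def pvFuelB (adj : List (Int × List Int)) : Nat :=
  adj.foldl (fun a p => a + 2 * p.2.length) 0 + adj.length + 2

def getinitState_alt (adj : List (Int × List Int)) (correct : Int) (u : Int) (guesses : List (Int × Int)) (parent : List (Int × Int)) : Int :=
  (pvDfsB adj guesses [(pvFuelB adj, u, (PySem.Dict.ofList adj).getD u [])]
    (correct, PySem.Dict.ofList parent)).1

-- ===== PRECONDITION & SPEC =====
-- Pre_ = exactly the inputs on which the Python A returns: the start node is a key of adj (else
-- KeyError), parent has the seeded root entry when it is read, every node the traversal can reach
-- is a key of adj (else KeyError on recursing into it), and the finite graph of non-backtracking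
-- edge states (came-from, node) reachable from u is acyclic — on a cycle A recurses forever
-- (RecursionError).  These are graph-shape conditions on the input, not a run of either port.
def pvPLook {α : Type} (l : List (Int × α)) (k : Int) : Option α :=
  (l.find? (fun p => p.1 == k)).map (·.2)

def pvPSucc (adj : List (Int × List Int)) (s : Int × Int) : List (Int × Int) :=
  (((pvPLook adj s.2).getD []).filter (fun w => w != s.1)).map (fun w => (s.2, w))

def pvPGrow (adj : List (Int × List Int)) (S : List (Int × Int)) : List (Int × Int) :=
  (S ++ S.flatMap (pvPSucc adj)).dedup

def pvPPrune (adj : List (Int × List Int)) (S : List (Int × Int)) : List (Int × Int) :=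
  S.filter (fun s => (pvPSucc adj s).any (fun t => S.contains t))

def pvPSize (adj : List (Int × List Int)) : Nat :=
  adj.length + adj.foldl (fun a p => a + 2 * p.2.length) 0 + 2

def pvPreB (adj : List (Int × List Int)) (u : Int) (parent : List (Int × Int)) : Bool :=
  match pvPLook adj u with
  | none => false
  | some cu =>
    if cu.isEmpty then true
    else
      match pvPLook parent u with
      | none => false
      | some pu =>
        let n := pvPSize adj
        let R := (pvPGrow adj)^[n] ((cu.filter (fun v => v != pu)).map (fun v => (u, v)))
        R.all (fun s => (pvPLook adj s.2).isSome) && ((pvPPrune adj)^[n] R).isEmpty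

def Pre_getinitState (adj : List (Int × List Int)) (correct : Int) (u : Int) (guesses : List (Int × Int)) (parent : List (Int × Int)) : Prop :=
  pvPreB adj u parent = true
instance (adj : List (Int × List Int)) (correct : Int) (u : Int) (guesses : List (Int × Int)) (parent : List (Int × Int)) : Decidable (Pre_getinitState adj correct u guesses parent) := by unfold Pre_getinitState; infer_instance

def pvWitness_getinitState : (List (Int × List Int)) × Int × Int × (List (Int × Int)) × (List (Int × Int)) :=
  ([(0, [1]), (1, [])], 0, 0, [(0, 1)], [(0, 0)])

def Spec_getinitState (adj : List (Int × List Int)) (correct : Int) (u : Int) (guesses : List (Int × Int)) (parent : List (Int × Int)) (out : Int) : Prop := out = getinitState_alt adj correct u guesses parent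
instance (adj : List (Int × List Int)) (correct : Int) (u : Int) (guesses : List (Int × Int)) (parent : List (Int × Int)) (out : Int) : Decidable (Spec_getinitState adj correct u guesses parent out) := by unfold Spec_getinitState; infer_instance

-- ===== CLAIM (what is proved, stated in full; the proofs are below) =====
def Claim_equal_getinitState : Prop := ∀ (adj : List (Int × List Int)) (correct : Int) (u : Int) (guesses : List (Int × Int)) (parent : List (Int × Int)), Dom_getinitState adj correct u guesses parent → Pre_getinitState adj correct u guesses parent → Spec_getinitState adj correct u guesses parent (getinitState adj correct u guesses parent)

-- ===== LEMMAS AND PROOFS =====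
-- B's stack machine runs A's loop frames in order: frame (f, node, vs) is exactly the rest of
-- A's child loop at node with child fuel f.
theorem pv_dfsB_eq_foldl (adjL : List (Int × List Int)) (guesses : List (Int × Int)) :
    ∀ (stack : List (Nat × Int × List Int)) (s : Int × PySem.Dict Int Int),
      pvDfsB adjL guesses stack s
        = stack.foldl (fun t fr => pvLoopA adjL guesses fr.1 fr.2.1 fr.2.2 t) s := by
  intro stack s
  induction stack, s using pvDfsB.induct adjL guesses with
  | case1 s => simp [pvDfsB]
  | case2 f node rest s ih =>
      simp only [pvDfsB, List.foldl_cons]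
      rw [ih]; congr 1
      simp only [pvLoopA]
  | case3 node v vs rest c par h par' c' ih =>
      simp only [pvDfsB, List.foldl_cons] at ih ⊢
      simp only [par', c', dite_eq_ite] at ih
      rw [if_pos h, ih]; congr 1
      simp only [pvLoopA, pvVisitA]
      rw [if_pos h]
  | case4 node v vs rest c par h par' c' g ih =>
      simp only [pvDfsB, List.foldl_cons] at ih ⊢
      simp only [par', c', dite_eq_ite] at ih
      rw [if_pos h, ih]; congr 1
      simp only [pvLoopA, pvVisitA, Nat.succ_eq_add_one]
      rw [if_pos h]
  | case5 f node v vs rest c par h ih =>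
      simp only [pvDfsB, List.foldl_cons] at ih ⊢
      rw [if_neg h, ih]; congr 1
      simp only [pvLoopA]
      rw [if_neg h]

theorem pv_foldl2 : ∀ (l : List (Int × List Int)) (a : Nat),
    l.foldl (fun a p => a + 2 * p.2.length) (2 * a) = 2 * l.foldl (fun a p => a + p.2.length) a := by
  intro l
  induction l with
  | nil => intro a; rfl
  | cons p t ih =>
      intro a
      simp only [List.foldl_cons]
      have h2 : 2 * a + 2 * p.2.length = 2 * (a + p.2.length) := by ring
      rw [h2, ih]

theorem pv_fuel_eq (adj : List (Int × List Int)) : pvFuelB adj = pvSize adj := by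
  unfold pvFuelB pvSize
  have h := pv_foldl2 adj 0
  simp only [Nat.mul_zero] at h
  omega

-- the two ports agree on every input
theorem pv_ports_eq (adj : List (Int × List Int)) (correct : Int) (u : Int)
    (guesses : List (Int × Int)) (parent : List (Int × Int)) :
    getinitState adj correct u guesses parent = getinitState_alt adj correct u guesses parent := by
  unfold getinitState getinitState_alt
  rw [pv_dfsB_eq_foldl, pv_fuel_eq]
  simp only [List.foldl_cons, List.foldl_nil]
  rw [pvVisitA]

-- ===== VERDICT (by name: the statement is the Claim_ definition above) =====
theorem getinitState_spec : Claim_equal_getinitState := by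
  intro adj correct u guesses parent _ _
  unfold Spec_getinitState
  exact pv_ports_eq adj correct u guesses parent
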